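-- pv_equiv track=rewrite | github.com/ahmetkaramercan/ebced_website | islami_numeroloji/hesaplama.py | ozellik_hesaplama
-- ===== SOURCE A (Python) =====
-- def ozellik_hesaplama(k):
--     """Pin kodu özellik hesaplama fonksiyonu"""
--     # Güvenli erişim için helper fonksiyon
--     def safe_get_first_digit(pin_value):
--         """Pin değerinin ilk rakamını güvenli şekilde al"""
--         if pin_value and len(pin_value) > 0 and pin_value[0].isdigit():
--             return int(pin_value[0])
--         return 0  # Varsayılan değer
--
--     # Özellik sözlükleri
--     ozellikler = {
--         'esnek': [1, 2, 3, 4],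
--         'katı': [5, 6, 7, 8],
--         'Etken/Baskın': [1, 3, 6, 8],
--         'edilgen': [2, 4, 5, 7],
--         'hava': [1, 5],
--         'su': [2, 7],
--         'toprak': [4, 8],
--         'ateş': [3, 6]
--     }
--
--     # Özellik sayacı
--     sayac = {key: 0 for key in ozellikler.keys()}
--     rakam_dizisi = [0,0,0,0,0,0,0,0,0]
--
--     # Güvenli erişimle rakam dizisini doldur
--     for i in range(0, min(9, len(k))):
--         rakam_dizisi[i] = safe_get_first_digit(k[i])
--
--     # Her rakamı kontrol ederek ilgili özellik sayısını artır
--     for rakam in rakam_dizisi: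
--         for ozellik, degerler in ozellikler.items():
--             if rakam in degerler:
--                 sayac[ozellik] += 1
--
--     result = ""
--     for ozellik, deger in sayac.items():
--         result += f"{ozellik}: {deger}    "
--
--     return result
-- ===== SOURCE B (Python) =====
-- def ozellik_hesaplama(k):
--     """Pin kodu özellik hesaplama fonksiyonu (frequency-table re-implementation)"""
--     def first_digit(pin_value):
--         if pin_value and pin_value[0].isdigit():
--             return int(pin_value[0])
--         return 0
--
--     digits = [first_digit(p) for p in k[:9]]
--
--     freq = [0] * 10
--     for d in digits:
--         freq[d] += 1
--
--     ozellikler = {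
--         'esnek': [1, 2, 3, 4],
--         'katı': [5, 6, 7, 8],
--         'Etken/Baskın': [1, 3, 6, 8],
--         'edilgen': [2, 4, 5, 7],
--         'hava': [1, 5],
--         'su': [2, 7],
--         'toprak': [4, 8],
--         'ateş': [3, 6]
--     }
--
--     return "".join(
--         f"{ozellik}: {sum(freq[d] for d in degerler)}    "
--         for ozellik, degerler in ozellikler.items()
--     )
-- ===== Notes on version B (the rewrite author's own statement) =====
-- stated objective: alternative
-- what changed: Replaces A's padded 9-slot array and digit-by-category nested membership scan (plus a running counter dict) by a single-pass digit frequency table, with each category's count obtained as the sum of the frequencies of its digits; the result string is built with join instead of += accumulation.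
import Mathlib
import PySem

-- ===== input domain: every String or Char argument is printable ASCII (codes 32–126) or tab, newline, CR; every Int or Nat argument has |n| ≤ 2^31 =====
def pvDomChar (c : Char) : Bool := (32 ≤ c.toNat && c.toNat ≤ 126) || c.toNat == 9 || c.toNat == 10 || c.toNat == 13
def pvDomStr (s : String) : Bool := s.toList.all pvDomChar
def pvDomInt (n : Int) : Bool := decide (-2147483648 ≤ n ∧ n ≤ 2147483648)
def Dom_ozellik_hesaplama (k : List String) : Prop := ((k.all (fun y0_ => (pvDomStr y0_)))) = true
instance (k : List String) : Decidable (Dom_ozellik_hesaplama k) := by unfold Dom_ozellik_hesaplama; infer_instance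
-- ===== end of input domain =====

-- B replaces A's digit×category nested membership scan over a padded 9-slot array by a digit
-- frequency table built in one pass and aggregated per category (objective: alternative).

-- ===== PORT A =====
def pvCatsA : List (String × List Int) :=
  [("esnek", [1, 2, 3, 4]), ("katı", [5, 6, 7, 8]), ("Etken/Baskın", [1, 3, 6, 8]),
   ("edilgen", [2, 4, 5, 7]), ("hava", [1, 5]), ("su", [2, 7]), ("toprak", [4, 8]), ("ateş", [3, 6])]

def pvSafeFirstA (s : String) : Int :=
  match s.toList with
  | [] => 0
  | c :: _ => if PySem.Chars.isdigit c then (PySem.Int.ofChars? [c]).getD 0 else 0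

def ozellik_hesaplama (k : List String) : String :=
  let sayac0 : PySem.Dict String Int := pvCatsA.foldl (fun d p => d.insert p.1 0) ⟨[]⟩
  let rd0 : List Int := [0, 0, 0, 0, 0, 0, 0, 0, 0]
  let rd := (PySem.List.pyRange 0 (min 9 (k.length : Int))).foldl
      (fun rd i => rd.set i.toNat (pvSafeFirstA (PySem.List.pyGetD k i ""))) rd0
  let sayac := rd.foldl
      (fun s r => pvCatsA.foldl (fun s p => if r ∈ p.2 then s.insert p.1 (s.getD p.1 0 + 1) else s) s) sayac0
  sayac.items.foldl (fun res p => res ++ p.1 ++ ": " ++ PySem.Int.toStr p.2 ++ "    ") ""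

-- ===== PORT B =====
def pvCatsB : List (String × List Int) :=
  [("esnek", [1, 2, 3, 4]), ("katı", [5, 6, 7, 8]), ("Etken/Baskın", [1, 3, 6, 8]),
   ("edilgen", [2, 4, 5, 7]), ("hava", [1, 5]), ("su", [2, 7]), ("toprak", [4, 8]), ("ateş", [3, 6])]

def pvSafeFirstB (s : String) : Int :=
  match s.toList with
  | [] => 0
  | c :: _ => if PySem.Chars.isdigit c then (PySem.Int.ofChars? [c]).getD 0 else 0

def ozellik_hesaplama_alt (k : List String) : String :=
  let digits := (PySem.List.slice k none (some 9)).map pvSafeFirstB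
  let freq := digits.foldl (fun f d => f.set d.toNat (f.getD d.toNat 0 + 1)) (List.replicate 10 (0 : Int))
  PySem.Str.join ""
    (pvCatsB.map (fun p =>
      p.1 ++ ": " ++ PySem.Int.toStr ((p.2.map (fun d => freq.getD d.toNat 0)).sum) ++ "    "))

-- ===== PRECONDITION & SPEC =====
def Spec_ozellik_hesaplama (k : List String) (out : String) : Prop := out = ozellik_hesaplama_alt k
instance (k : List String) (out : String) : Decidable (Spec_ozellik_hesaplama k out) := by unfold Spec_ozellik_hesaplama; infer_instance

-- ===== CLAIM (what is proved, stated in full; the proofs are below) =====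
def Claim_equal_ozellik_hesaplama : Prop := ∀ (k : List String), Dom_ozellik_hesaplama k → Spec_ozellik_hesaplama k (ozellik_hesaplama k)

-- ===== LEMMAS AND PROOFS =====

-- the dict state A maintains, as an 8-value shape
def pvMkD (a b c d e f g h : Int) : PySem.Dict String Int :=
  ⟨[("esnek", a), ("katı", b), ("Etken/Baskın", c), ("edilgen", d),
    ("hava", e), ("su", f), ("toprak", g), ("ateş", h)]⟩

def pvInd (r : Int) (v : List Int) : Int := if r ∈ v then 1 else 0

def pvCnt (v : List Int) (ds : List Int) : Int := (ds.countP (fun x => decide (x ∈ v)) : Int)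

lemma pv_ofChars_digit (c : Char) (h1 : '0' ≤ c) (h2 : c ≤ '9') :
    PySem.Int.ofChars? [c] = some ((c.toNat : Int) - 48) := by
  have hl : (48 : Nat) ≤ c.toNat := Nat.succ_le_of_lt h1
  have hu : c.toNat ≤ 57 := h2
  have hofNat : Char.ofNat c.toNat = c := Char.ofNat_toNat c
  interval_cases h : c.toNat <;> rw [← hofNat] <;> decide

lemma pv_first_bounds (s : String) : 0 ≤ pvSafeFirstA s ∧ pvSafeFirstA s < 10 := by
  cases hs : s.toList with
  | nil => simp [pvSafeFirstA, hs]
  | cons c t =>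
    by_cases hd : PySem.Chars.isdigit c
    · have hb : ('0' ≤ c ∧ c ≤ '9') := by simpa [PySem.Chars.isdigit] using hd
      have hl : (48 : Nat) ≤ c.toNat := Nat.succ_le_of_lt hb.1
      have hu : c.toNat ≤ 57 := hb.2
      simp only [pvSafeFirstA, hs, hd, if_true]
      rw [pv_ofChars_digit c hb.1 hb.2]
      simp only [Option.getD_some]
      omega
    · simp [pvSafeFirstA, hs, hd]

-- one per-category step of the inner loop on the fixed-shape dict
lemma pv_step_1 (p : Prop) [Decidable p] (a b c d e f g h : Int) :
    (if p then (pvMkD a b c d e f g h).insert "esnek" ((pvMkD a b c d e f g h).getD "esnek" 0 + 1)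
     else pvMkD a b c d e f g h) = pvMkD (a + if p then 1 else 0) b c d e f g h := by
  split_ifs <;> simp [pvMkD, PySem.Dict.insert, PySem.Dict.contains, PySem.Dict.getD, PySem.Dict.get?]

lemma pv_step_2 (p : Prop) [Decidable p] (a b c d e f g h : Int) :
    (if p then (pvMkD a b c d e f g h).insert "katı" ((pvMkD a b c d e f g h).getD "katı" 0 + 1)
     else pvMkD a b c d e f g h) = pvMkD a (b + if p then 1 else 0) c d e f g h := by
  split_ifs <;> simp [pvMkD, PySem.Dict.insert, PySem.Dict.contains, PySem.Dict.getD, PySem.Dict.get?]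

lemma pv_step_3 (p : Prop) [Decidable p] (a b c d e f g h : Int) :
    (if p then (pvMkD a b c d e f g h).insert "Etken/Baskın" ((pvMkD a b c d e f g h).getD "Etken/Baskın" 0 + 1)
     else pvMkD a b c d e f g h) = pvMkD a b (c + if p then 1 else 0) d e f g h := by
  split_ifs <;> simp [pvMkD, PySem.Dict.insert, PySem.Dict.contains, PySem.Dict.getD, PySem.Dict.get?]

lemma pv_step_4 (p : Prop) [Decidable p] (a b c d e f g h : Int) :
    (if p then (pvMkD a b c d e f g h).insert "edilgen" ((pvMkD a b c d e f g h).getD "edilgen" 0 + 1)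
     else pvMkD a b c d e f g h) = pvMkD a b c (d + if p then 1 else 0) e f g h := by
  split_ifs <;> simp [pvMkD, PySem.Dict.insert, PySem.Dict.contains, PySem.Dict.getD, PySem.Dict.get?]

lemma pv_step_5 (p : Prop) [Decidable p] (a b c d e f g h : Int) :
    (if p then (pvMkD a b c d e f g h).insert "hava" ((pvMkD a b c d e f g h).getD "hava" 0 + 1)
     else pvMkD a b c d e f g h) = pvMkD a b c d (e + if p then 1 else 0) f g h := by
  split_ifs <;> simp [pvMkD, PySem.Dict.insert, PySem.Dict.contains, PySem.Dict.getD, PySem.Dict.get?]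

lemma pv_step_6 (p : Prop) [Decidable p] (a b c d e f g h : Int) :
    (if p then (pvMkD a b c d e f g h).insert "su" ((pvMkD a b c d e f g h).getD "su" 0 + 1)
     else pvMkD a b c d e f g h) = pvMkD a b c d e (f + if p then 1 else 0) g h := by
  split_ifs <;> simp [pvMkD, PySem.Dict.insert, PySem.Dict.contains, PySem.Dict.getD, PySem.Dict.get?]

lemma pv_step_7 (p : Prop) [Decidable p] (a b c d e f g h : Int) :
    (if p then (pvMkD a b c d e f g h).insert "toprak" ((pvMkD a b c d e f g h).getD "toprak" 0 + 1)
     else pvMkD a b c d e f g h) = pvMkD a b c d e f (g + if p then 1 else 0) h := by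
  split_ifs <;> simp [pvMkD, PySem.Dict.insert, PySem.Dict.contains, PySem.Dict.getD, PySem.Dict.get?]

lemma pv_step_8 (p : Prop) [Decidable p] (a b c d e f g h : Int) :
    (if p then (pvMkD a b c d e f g h).insert "ateş" ((pvMkD a b c d e f g h).getD "ateş" 0 + 1)
     else pvMkD a b c d e f g h) = pvMkD a b c d e f g (h + if p then 1 else 0) := by
  split_ifs <;> simp [pvMkD, PySem.Dict.insert, PySem.Dict.contains, PySem.Dict.getD, PySem.Dict.get?]

-- the inner category loop on one digit
lemma pv_inner_step (r a b c d e f g h : Int) :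
    pvCatsA.foldl (fun s p => if r ∈ p.2 then s.insert p.1 (s.getD p.1 0 + 1) else s)
        (pvMkD a b c d e f g h) =
      pvMkD (a + pvInd r [1,2,3,4]) (b + pvInd r [5,6,7,8]) (c + pvInd r [1,3,6,8])
            (d + pvInd r [2,4,5,7]) (e + pvInd r [1,5]) (f + pvInd r [2,7])
            (g + pvInd r [4,8]) (h + pvInd r [3,6]) := by
  simp only [pvCatsA, List.foldl_cons, List.foldl_nil]
  rw [pv_step_1, pv_step_2, pv_step_3, pv_step_4, pv_step_5, pv_step_6, pv_step_7, pv_step_8]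
  rfl

lemma pv_cnt_cons (v : List Int) (r : Int) (t : List Int) :
    pvCnt v (r :: t) = pvInd r v + pvCnt v t := by
  unfold pvCnt pvInd
  rw [List.countP_cons]
  split_ifs <;> simp_all <;> ring

-- the outer digit loop
lemma pv_loopA (ds : List Int) : ∀ (a b c d e f g h : Int),
    ds.foldl (fun s r => pvCatsA.foldl
        (fun s p => if r ∈ p.2 then s.insert p.1 (s.getD p.1 0 + 1) else s) s)
      (pvMkD a b c d e f g h) =
      pvMkD (a + pvCnt [1,2,3,4] ds) (b + pvCnt [5,6,7,8] ds) (c + pvCnt [1,3,6,8] ds)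
            (d + pvCnt [2,4,5,7] ds) (e + pvCnt [1,5] ds) (f + pvCnt [2,7] ds)
            (g + pvCnt [4,8] ds) (h + pvCnt [3,6] ds) := by
  induction ds with
  | nil => intro a b c d e f g h; simp [pvCnt]
  | cons r t ih =>
    intro a b c d e f g h
    simp only [List.foldl_cons, pv_inner_step, ih, pv_cnt_cons]
    congr 1 <;> ring

-- the fill loop: A's padded 9-array is the mapped prefix plus zero padding
lemma pv_fill_partial (k : List String) (j : Nat) (hj : j ≤ min 9 k.length) :
    (PySem.List.pyRange 0 (j : Int)).foldl
        (fun rd i => rd.set i.toNat (pvSafeFirstA (PySem.List.pyGetD k i "")))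
        [0, 0, 0, 0, 0, 0, 0, 0, 0] =
      (k.take j).map pvSafeFirstA ++ List.replicate (9 - j) 0 := by
  induction j with
  | zero => simp [PySem.List.pyRange]
  | succ j ih =>
    have hj' : j ≤ min 9 k.length := by omega
    have hrange : PySem.List.pyRange 0 ((j : Int) + 1) = PySem.List.pyRange 0 (j : Int) ++ [(j : Int)] :=
      PySem.List.pyRange_one_succ_right (by positivity)
    have hcast : ((j + 1 : Nat) : Int) = (j : Int) + 1 := by push_cast; ring
    rw [hcast, hrange, List.foldl_append, ih hj']
    have hjk : j < k.length := by omega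
    have hlen : ((k.take j).map pvSafeFirstA).length = j := by
      simp [List.length_take]; omega
    have hget : PySem.List.pyGetD k ((j : Int)) "" = k[j] := by
      rw [PySem.List.pyGetD_natCast]; exact List.getD_eq_getElem _ _ hjk
    simp only [List.foldl_cons, List.foldl_nil, Int.toNat_natCast, hget]
    rw [List.set_append_right _ _ (by omega)]
    have h9 : 9 - j = (9 - (j + 1)) + 1 := by omega
    rw [hlen, Nat.sub_self, h9, List.replicate_succ, List.set_cons_zero]
    have htake : List.take (j + 1) (List.map pvSafeFirstA k) =
        List.take j (List.map pvSafeFirstA k) ++ [pvSafeFirstA k[j]] := by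
      rw [List.take_add_one]
      congr
      rw [List.getElem?_map, List.getElem?_eq_getElem hjk]
      rfl
    simp [htake]

-- count over the zero padding vanishes when 0 is not in the category
lemma pv_cnt_pad (v : List Int) (hv : (0 : Int) ∉ v) (xs : List Int) (m : Nat) :
    pvCnt v (xs ++ List.replicate m 0) = pvCnt v xs := by
  unfold pvCnt
  rw [List.countP_append]
  have hz : (List.replicate m (0 : Int)).countP (fun x => decide (x ∈ v)) = 0 := by
    apply List.countP_eq_zero.mpr
    intro a ha
    rw [List.eq_of_mem_replicate ha]
    simpa using hv
  rw [hz]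
  push_cast
  ring

-- B's frequency table, pointwise
lemma pv_freq_spec (ds : List Int) : ∀ (f : List Int), f.length = 10 →
    (∀ d ∈ ds, 0 ≤ d ∧ d < 10) → ∀ (m : Nat), m < 10 →
    (ds.foldl (fun f d => f.set d.toNat (f.getD d.toNat 0 + 1)) f).getD m 0 =
      f.getD m 0 + (ds.countP (fun x => decide (x = (m : Int))) : Int) := by
  induction ds with
  | nil => intro f _ _ m _; simp
  | cons d t ih =>
    intro f hf hb m hm
    have hd := hb d (by simp)
    have hlen : (f.set d.toNat (f.getD d.toNat 0 + 1)).length = 10 := by simp [hf]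
    have hbt : ∀ x ∈ t, 0 ≤ x ∧ x < 10 := fun x hx => hb x (by simp [hx])
    simp only [List.foldl_cons]
    rw [ih _ hlen hbt m hm]
    have hcnt : (List.countP (fun x => decide (x = (m : Int))) (d :: t) : Int) =
        (List.countP (fun x => decide (x = (m : Int))) t : Int) + (if d = (m : Int) then 1 else 0) := by
      rw [List.countP_cons]; split_ifs <;> simp_all
    rw [hcnt]
    by_cases he : d.toNat = m
    · subst he
      have hdm : d = ((d.toNat : Nat) : Int) := by omega
      rw [List.getD_eq_getElem?_getD, List.getElem?_set_self (by omega), if_pos hdm]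
      simp only [Option.getD_some]
      ring
    · have hdm : ¬ d = (m : Int) := by omega
      rw [List.getD_eq_getElem?_getD, List.getElem?_set_ne he]
      rw [List.getD_eq_getElem?_getD]
      simp [hdm]

-- sum of equality indicators over a duplicate-free list is a membership indicator
lemma pv_sum_ind (r : Int) (v : List Int) (hv : v.Nodup) :
    (v.map (fun d => if r = d then (1 : Int) else 0)).sum = pvInd r v := by
  induction v with
  | nil => simp [pvInd]
  | cons d t ih =>
    simp only [List.nodup_cons] at hv
    rw [List.map_cons, List.sum_cons, ih hv.2]
    unfold pvInd
    by_cases hr : r = d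
    · subst hr
      simp [hv.1]
    · simp [hr]

-- double counting: membership count = sum of per-digit counts
lemma pv_double_count (v : List Int) (hv : v.Nodup) (ds : List Int) :
    pvCnt v ds = (v.map (fun d => (ds.countP (fun x => decide (x = d)) : Int))).sum := by
  induction ds with
  | nil => simp [pvCnt]
  | cons r t ih =>
    have hstep : ∀ d : Int, ((r :: t).countP (fun x => decide (x = d)) : Int) =
        (t.countP (fun x => decide (x = d)) : Int) + (if r = d then 1 else 0) := by
      intro d; rw [List.countP_cons]; split_ifs <;> simp_all
    have hsum : (v.map (fun d => ((r :: t).countP (fun x => decide (x = d)) : Int))).sum =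
        (v.map (fun d => (t.countP (fun x => decide (x = d)) : Int))).sum +
          (v.map (fun d => if r = d then (1 : Int) else 0)).sum := by
      simp only [hstep]
      rw [← PySem.List.sum_map_add_int]
    rw [pv_cnt_cons, hsum, ← ih, pv_sum_ind r v hv]
    ring

-- ===== VERDICT (by name: the statement is the Claim_ definition above) =====
theorem ozellik_hesaplama_spec : Claim_equal_ozellik_hesaplama := by
  intro k _
  unfold Spec_ozellik_hesaplama
  simp only [ozellik_hesaplama, ozellik_hesaplama_alt]
  rw [show (pvCatsA.foldl (fun d p => d.insert p.1 0) (⟨[]⟩ : PySem.Dict String Int)) = pvMkD 0 0 0 0 0 0 0 0 from rfl]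
  rw [show min 9 ((k.length : Nat) : Int) = ((min 9 k.length : Nat) : Int) by omega]
  rw [pv_fill_partial k (min 9 k.length) (le_refl _)]
  rw [List.take_eq_take_iff.mpr (show min (min 9 k.length) k.length = min 9 k.length by omega)]
  rw [pv_loopA]
  simp only [zero_add]
  rw [pv_cnt_pad [1,2,3,4] (by decide), pv_cnt_pad [5,6,7,8] (by decide),
      pv_cnt_pad [1,3,6,8] (by decide), pv_cnt_pad [2,4,5,7] (by decide),
      pv_cnt_pad [1,5] (by decide), pv_cnt_pad [2,7] (by decide),
      pv_cnt_pad [4,8] (by decide), pv_cnt_pad [3,6] (by decide)]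
  rw [show PySem.List.slice k none (some 9) = k.take 9 by
        rw [PySem.List.slice_to k (by norm_num)]; rfl]
  rw [show pvSafeFirstB = pvSafeFirstA from rfl]
  set ds := List.map pvSafeFirstA (List.take 9 k) with hds
  have hb' : ∀ d ∈ ds, 0 ≤ d ∧ d < 10 := by
    intro d hd
    obtain ⟨s, _, rfl⟩ := List.mem_map.mp hd
    exact pv_first_bounds s
  have hfreq : ∀ m : Nat, m < 10 →
      (ds.foldl (fun f d => f.set d.toNat (f.getD d.toNat 0 + 1)) (List.replicate 10 (0:Int))).getD m 0 =
        (ds.countP (fun x => decide (x = (m : Int))) : Int) := by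
    intro m hm
    rw [pv_freq_spec ds _ (by simp) hb' m hm]
    simp only [List.getD_eq_getElem?_getD]
    interval_cases m <;> simp
  simp only [pvCatsB, List.map_cons, List.map_nil, List.sum_cons, List.sum_nil, add_zero]
  simp only [show Int.toNat 1 = 1 from rfl, show Int.toNat 2 = 2 from rfl,
             show Int.toNat 3 = 3 from rfl, show Int.toNat 4 = 4 from rfl,
             show Int.toNat 5 = 5 from rfl, show Int.toNat 6 = 6 from rfl,
             show Int.toNat 7 = 7 from rfl, show Int.toNat 8 = 8 from rfl]
  simp only [hfreq 1 (by norm_num), hfreq 2 (by norm_num), hfreq 3 (by norm_num),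
             hfreq 4 (by norm_num), hfreq 5 (by norm_num), hfreq 6 (by norm_num),
             hfreq 7 (by norm_num), hfreq 8 (by norm_num)]
  rw [pv_double_count [1,2,3,4] (by decide) ds, pv_double_count [5,6,7,8] (by decide) ds,
      pv_double_count [1,3,6,8] (by decide) ds, pv_double_count [2,4,5,7] (by decide) ds,
      pv_double_count [1,5] (by decide) ds, pv_double_count [2,7] (by decide) ds,
      pv_double_count [4,8] (by decide) ds, pv_double_count [3,6] (by decide) ds]
  simp only [List.map_cons, List.map_nil, List.sum_cons, List.sum_nil, add_zero,
             Nat.cast_ofNat, Nat.cast_one]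
  simp only [pvMkD, List.foldl_cons, List.foldl_nil]
  apply String.toList_inj.mp
  simp [PySem.Str.join, PySem.Chars.join, String.toList_append, List.intercalate, List.intersperse]
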